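-- pv_equiv track=rewrite | github.com/alokdangre/FormPilot | backend/app/tools/verification_tools.py | _find_actual_field
-- ===== SOURCE A (Python) =====
-- def _find_actual_field(expected: dict, actual_fields: list) -> dict | None:
--     selector = str(expected.get("selector", "")).strip()
--     if selector:
--         exact = next((field for field in actual_fields if str(field.get("selector", "")).strip() == selector), None)
--         if exact:
--             return exact
--
--     expected_label = str(expected.get("label", "")).strip().lower()
--     if not expected_label:
--         return None
--
--     for field in actual_fields:
--         actual_label = str(field.get("label", "")).strip().lower()
--         if actual_label == expected_label:
--             return field
--
--     for field in actual_fields: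
--         actual_label = str(field.get("label", "")).strip().lower()
--         if expected_label and actual_label and (expected_label in actual_label or actual_label in expected_label):
--             return field
--
--     return None
-- ===== SOURCE B (Python) =====
-- def _find_actual_field(expected: dict, actual_fields: list) -> dict | None:
--     sel = str(expected.get("selector", "")).strip()
--     lab = str(expected.get("label", "")).strip().lower()
--     sel_hit = exact_hit = sub_hit = None
--     for field in actual_fields:
--         if sel and sel_hit is None and str(field.get("selector", "")).strip() == sel:
--             sel_hit = field
--         al = str(field.get("label", "")).strip().lower()
--         if exact_hit is None and al == lab:
--             exact_hit = field
--         if sub_hit is None and lab and al and (lab in al or al in lab):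
--             sub_hit = field
--     if sel_hit is not None:
--         return sel_hit
--     if not lab:
--         return None
--     if exact_hit is not None:
--         return exact_hit
--     return sub_hit
-- ===== Notes on version B (the rewrite author's own statement) =====
-- stated objective: alternative
-- what changed: Replaces A's three separate scans of actual_fields (selector next(), exact-label loop, substring-label loop) with one pass that records the first selector, exact-label and substring-label hits in three accumulators and picks among them by priority afterwards.
import Mathlib
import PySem

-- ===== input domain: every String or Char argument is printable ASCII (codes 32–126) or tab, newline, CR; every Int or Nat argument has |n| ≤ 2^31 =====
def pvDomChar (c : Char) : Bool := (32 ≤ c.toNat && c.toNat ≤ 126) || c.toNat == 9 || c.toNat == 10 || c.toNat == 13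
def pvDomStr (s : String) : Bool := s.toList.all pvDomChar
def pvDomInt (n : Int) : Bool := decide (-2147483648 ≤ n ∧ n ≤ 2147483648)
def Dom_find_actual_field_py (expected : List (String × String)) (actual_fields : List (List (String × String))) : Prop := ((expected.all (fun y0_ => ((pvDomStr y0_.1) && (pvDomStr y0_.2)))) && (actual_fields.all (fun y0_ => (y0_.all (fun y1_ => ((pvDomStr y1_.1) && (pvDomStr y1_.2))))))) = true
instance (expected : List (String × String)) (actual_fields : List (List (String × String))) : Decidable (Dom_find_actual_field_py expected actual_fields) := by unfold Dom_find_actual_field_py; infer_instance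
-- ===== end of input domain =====

-- B replaces A's three separate scans of actual_fields (selector next(), exact-label loop,
-- substring-label loop) by one pass recording the first hit of each kind, then picks by priority.

-- shared normalization helpers (each port's Python contains these expressions verbatim)
-- dict.get(k, "") on the association-list representation (first match)
def pvGetD (f : List (String × String)) (k : String) : String :=
  match f.find? (fun p => p.1 == k) with
  | some p => p.2
  | none => ""
def pvSelOf (f : List (String × String)) : String :=
  PySem.Str.strip (pvGetD f "selector")
def pvLabOf (f : List (String × String)) : String :=
  PySem.Str.lower (PySem.Str.strip (pvGetD f "label"))
-- the substring-match condition both Pythons contain verbatim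
def pvSubPred (lab : String) (f : List (String × String)) : Bool :=
  !(lab == "") && !(pvLabOf f == "") && (PySem.Str.isIn lab (pvLabOf f) || PySem.Str.isIn (pvLabOf f) lab)

-- ===== PORT A =====
-- the two label loops of A (everything after the selector block)
def pvLabelSearchA (expected : List (String × String)) (actual_fields : List (List (String × String))) : Option (List (String × String)) :=
  if pvLabOf expected == "" then none
  else
    match actual_fields.find? (fun field => pvLabOf field == pvLabOf expected) with
    | some field => some field
    | none => actual_fields.find? (fun field => pvSubPred (pvLabOf expected) field)

def find_actual_field_py (expected : List (String × String)) (actual_fields : List (List (String × String))) : Option (List (String × String)) :=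
  match (if !(pvSelOf expected == "") then actual_fields.find? (fun field => pvSelOf field == pvSelOf expected) else none) with
  | some field =>
      -- Python's `if exact:` — an empty dict is falsy
      if field.isEmpty then pvLabelSearchA expected actual_fields else some field
  | none => pvLabelSearchA expected actual_fields

-- ===== PORT B =====
-- one loop iteration of Source B: fill each still-None slot on its condition
def pvStepB (sel lab : String) :
    (Option (List (String × String)) × Option (List (String × String)) × Option (List (String × String))) →
    List (String × String) →
    (Option (List (String × String)) × Option (List (String × String)) × Option (List (String × String)))
  | (sel_hit, exact_hit, sub_hit), field =>
    ((if !(sel == "") && sel_hit.isNone && (pvSelOf field == sel) then some field else sel_hit),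
     (if exact_hit.isNone && (pvLabOf field == lab) then some field else exact_hit),
     (if sub_hit.isNone && pvSubPred lab field then some field else sub_hit))

def find_actual_field_py_alt (expected : List (String × String)) (actual_fields : List (List (String × String))) : Option (List (String × String)) :=
  match actual_fields.foldl (pvStepB (pvSelOf expected) (pvLabOf expected)) (none, none, none) with
  | (sel_hit, exact_hit, sub_hit) =>
    match sel_hit with
    | some f => some f
    | none =>
      if pvLabOf expected == "" then none
      else match exact_hit with
        | some f => some f
        | none => sub_hit

-- ===== PRECONDITION & SPEC =====
def Spec_find_actual_field_py (expected : List (String × String)) (actual_fields : List (List (String × String))) (out : Option (List (String × String))) : Prop := out = find_actual_field_py_alt expected actual_fields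
instance (expected : List (String × String)) (actual_fields : List (List (String × String))) (out : Option (List (String × String))) : Decidable (Spec_find_actual_field_py expected actual_fields out) := by unfold Spec_find_actual_field_py; infer_instance

-- ===== CLAIM (what is proved, stated in full; the proofs are below) =====
def Claim_equal_find_actual_field_py : Prop := ∀ (expected : List (String × String)) (actual_fields : List (List (String × String))), Dom_find_actual_field_py expected actual_fields → Spec_find_actual_field_py expected actual_fields (find_actual_field_py expected actual_fields)

-- ===== LEMMAS AND PROOFS =====

-- the single pass computes the first hit of each of the three predicates
theorem foldl_pvStepB (sel lab : String) (xs : List (List (String × String)))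
    (a b c : Option (List (String × String))) :
    xs.foldl (pvStepB sel lab) (a, b, c) =
    ( (match a with
        | some x => some x
        | none => xs.find? (fun f => !(sel == "") && (pvSelOf f == sel))),
      (match b with
        | some x => some x
        | none => xs.find? (fun f => pvLabOf f == lab)),
      (match c with
        | some x => some x
        | none => xs.find? (fun f => pvSubPred lab f)) ) := by
  induction xs generalizing a b c with
  | nil => cases a <;> cases b <;> cases c <;> simp
  | cons x xs ih =>
    cases a <;> cases b <;> cases c <;>
      (simp only [List.foldl_cons, pvStepB, Option.isNone_some, Option.isNone_none,
        Bool.and_true, Bool.true_and, Bool.and_false, Bool.false_and, if_false,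
        Bool.false_eq_true, ih, List.find?_cons]) <;>
      (cases h1 : (!(sel == "") && (pvSelOf x == sel)) <;>
       cases h2 : (pvLabOf x == lab) <;>
       cases h3 : pvSubPred lab x <;>
       simp [h1, h2, h3, List.find?_cons])

-- the guard `sel ≠ ""` inside the pass's selector predicate, resolved either way
theorem find?_selGuard_of_ne (sel : String) (xs : List (List (String × String))) (h : (sel == "") = false) :
    xs.find? (fun f => !(sel == "") && (pvSelOf f == sel)) = xs.find? (fun f => pvSelOf f == sel) := by
  simp [h]

theorem find?_selGuard_of_eq (sel : String) (xs : List (List (String × String))) (h : (sel == "") = true) :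
    xs.find? (fun f => !(sel == "") && (pvSelOf f == sel)) = none := by
  simp [h]

-- a field found by the selector scan under a non-empty selector is a non-empty dict
theorem find?_sel_not_empty (sel : String) (xs : List (List (String × String))) (f : List (String × String))
    (h : xs.find? (fun f => !(sel == "") && (pvSelOf f == sel)) = some f) : f.isEmpty = false := by
  have hp := List.find?_some h
  cases f with
  | cons _ _ => rfl
  | nil =>
    exfalso
    have hsel : pvSelOf ([] : List (String × String)) = "" := by decide
    simp [hsel] at hp

-- ===== VERDICT (by name: the statement is the Claim_ definition above) =====
theorem find_actual_field_py_spec : Claim_equal_find_actual_field_py := by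
  intro expected actual_fields _
  unfold Spec_find_actual_field_py find_actual_field_py find_actual_field_py_alt pvLabelSearchA
  rw [foldl_pvStepB]
  rcases hsel : actual_fields.find? (fun f => !(pvSelOf expected == "") && (pvSelOf f == pvSelOf expected)) with _ | f
  · -- no selector hit (or empty selector)
    cases he : (pvSelOf expected == "") with
    | true =>
      simp only [he, Bool.not_true, Bool.false_eq_true, if_false, hsel]
    | false =>
      rw [find?_selGuard_of_ne _ _ he] at hsel
      simp only [Bool.not_false, if_true, hsel]
  · -- selector hit: the selector is non-empty and f is a non-empty dict
    have hemp := find?_sel_not_empty _ _ _ hsel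
    have hne : (pvSelOf expected == "") = false := by
      cases h' : (pvSelOf expected == "") with
      | false => rfl
      | true => rw [find?_selGuard_of_eq _ _ h'] at hsel; exact absurd hsel (by simp)
    rw [find?_selGuard_of_ne _ _ hne] at hsel
    simp [hne, hsel, hemp]
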